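-- pv_equiv track=rewrite | github.com/wjwitek/ASD2021L | Kolokwium II/pokemony.py | release_them_all
-- ===== SOURCE A (Python) =====
-- from queue import LifoQueue
--
-- def release_them_all(hunting_list, n):
--     # create graph
--     graph = [[] for _ in range(n)]
--     for animal in hunting_list:
--         graph[animal[0]].append(animal[1])
--     dfs_queue = LifoQueue()
--     visited = [False for _ in range(n)]
--     processed = [False for _ in range(n)]
--     indexes = [0 for _ in range(n)]
--     result = []
--     for i in range(n):
--         if not visited[i]:
--             dfs_queue.put(i)
--             visited[i] = True
--             while not dfs_queue.empty():
--                 temp = dfs_queue.get()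
--                 while indexes[temp] < len(graph[temp]) and visited[graph[temp][indexes[temp]]]:
--                     indexes[temp] += 1
--                 if indexes[temp] < len(graph[temp]):
--                     visited[graph[temp][indexes[temp]]] = True
--                     dfs_queue.put(temp)
--                     dfs_queue.put(graph[temp][indexes[temp]])
--                     indexes[temp] += 1
--                 else:
--                     processed[temp] = True
--                     count = 0
--                     for child in graph[temp]:
--                         if processed[child]:
--                             count += 1
--                         if count > 1:
--                             break
--                     if count > 1 or len(graph[temp]) == 0:
--                         result.append(temp)
--                     else:
--                         return None
--     return result
-- ===== SOURCE B (Python) =====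
-- def release_them_all(hunting_list, n):
--     graph = [[] for _ in range(n)]
--     for a, b in hunting_list:
--         graph[a].append(b)
--     visited = [False] * n
--     processed = [False] * n
--     result = []
--     for root in range(n):
--         if visited[root]:
--             continue
--         visited[root] = True
--         stack = [(root, graph[root][::-1])]
--         while stack:
--             node, todo = stack[-1]
--             child = None
--             while todo:
--                 c = todo.pop()
--                 if not visited[c]:
--                     child = c
--                     break
--             if child is not None:
--                 visited[child] = True
--                 stack.append((child, graph[child][::-1]))
--             else:
--                 stack.pop()
--                 processed[node] = True
--                 if graph[node] and sum(processed[c] for c in graph[node]) <= 1: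
--                     return None
--                 result.append(node)
--     return result
-- ===== Notes on version B (the rewrite author's own statement) =====
-- stated objective: alternative
-- what changed: B replaces A's node stack plus global per-node index array (with its resume-and-skip index loop) by a plain-list stack of (node, remaining-children) frames consumed in place, and tests the release condition with an aggregate sum over the children instead of A's early-break counter.
-- outside the precondition, e.g. on release_them_all([(0, 1), (2, 9)], 3): A returns None, B returns None
import Mathlib
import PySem

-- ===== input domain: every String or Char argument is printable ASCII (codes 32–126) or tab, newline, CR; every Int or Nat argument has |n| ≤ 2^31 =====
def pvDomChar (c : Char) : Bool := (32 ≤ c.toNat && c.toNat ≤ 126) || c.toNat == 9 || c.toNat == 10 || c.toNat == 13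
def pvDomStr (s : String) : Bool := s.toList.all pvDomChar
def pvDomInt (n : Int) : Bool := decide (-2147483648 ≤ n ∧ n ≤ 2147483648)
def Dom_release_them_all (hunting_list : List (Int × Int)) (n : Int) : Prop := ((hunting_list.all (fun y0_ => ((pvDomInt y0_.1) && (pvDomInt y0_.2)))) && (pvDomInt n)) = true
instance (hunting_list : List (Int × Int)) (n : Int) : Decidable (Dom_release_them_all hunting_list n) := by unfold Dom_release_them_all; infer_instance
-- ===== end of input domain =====

-- B replaces A's node stack plus global per-node index array by a stack of
-- (node, remaining-children) frames consumed in place, and an aggregate sum test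
-- instead of A's break-counter (objective: alternative decomposition, same cost).

-- Python list indexing wraps negative indices: slotOf maps a label to its slot.
def slotOf (n i : Int) : Nat := (if i < 0 then i + n else i).toNat

def getBool (l : List Bool) (k : Nat) : Bool := l.getD k false

-- graph = [[] for _ in range(n)]; for (a, b) in hunting_list: graph[a].append(b)
-- (this loop is textually shared by both Pythons)
def buildGraph (hl : List (Int × Int)) (n : Int) : List (List Int) :=
  hl.foldl (fun g ab => g.set (slotOf n ab.1) (g.getD (slotOf n ab.1) [] ++ [ab.2]))
    (List.replicate n.toNat [])

-- ===== PORT A =====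
-- A's inner skip loop: while indexes[temp] < len(children) and visited[children[indexes[temp]]]: indexes[temp] += 1
def skipVisited (children : List Int) (v : List Bool) (n : Int) (k : Nat) : Nat :=
  if h : k < children.length then
    if getBool v (slotOf n (children.getD k 0)) then skipVisited children v n (k + 1) else k
  else k
termination_by children.length - k

-- A's counting loop with the 'if count > 1: break'
def countLoopA (p : List Bool) (n : Int) : List Int → Nat → Nat
  | [], count => count
  | c :: rest, count =>
      let count' := if getBool p (slotOf n c) then count + 1 else count
      if count' > 1 then count' else countLoopA p n rest count'

-- A's while loop over the LifoQueue (fuel is only a totality guard; 2*n+1 bounds the pops)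
def whileA (g : List (List Int)) (n : Int) :
    Nat → List Int → List Bool → List Bool → List Nat → List Int →
    Option (List Bool × List Bool × List Nat × List Int)
  | _, [], v, p, ix, res => some (v, p, ix, res)
  | 0, _ :: _, v, p, ix, res => some (v, p, ix, res)
  | fuel + 1, temp :: rest, v, p, ix, res =>
      let children := g.getD (slotOf n temp) []
      let i := skipVisited children v n (ix.getD (slotOf n temp) 0)
      if i < children.length then
        whileA g n fuel (children.getD i 0 :: temp :: rest)
          (v.set (slotOf n (children.getD i 0)) true) p (ix.set (slotOf n temp) (i + 1)) res
      else
        let p' := p.set (slotOf n temp) true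
        if countLoopA p' n children 0 > 1 ∨ children.length = 0 then
          whileA g n fuel rest v p' (ix.set (slotOf n temp) i) (res ++ [temp])
        else none

def forA (g : List (List Int)) (n : Int) :
    List Int → List Bool → List Bool → List Nat → List Int → Option (List Int)
  | [], _, _, _, res => some res
  | i :: is, v, p, ix, res =>
      if getBool v (slotOf n i) then forA g n is v p ix res
      else
        match whileA g n (2 * n.toNat + 1) [i] (v.set (slotOf n i) true) p ix res with
        | none => none
        | some (v', p', ix', res') => forA g n is v' p' ix' res'

def release_them_all (hunting_list : List (Int × Int)) (n : Int) : Option (List Int) :=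
  forA (buildGraph hunting_list n) n ((List.range n.toNat).map Int.ofNat)
    (List.replicate n.toNat false) (List.replicate n.toNat false)
    (List.replicate n.toNat 0) []

-- ===== PORT B =====
-- B's inner 'while todo: c = todo.pop(); if not visited[c]: …'.
-- Python keeps todo REVERSED and pops from the end; we represent that list
-- back-to-front (head = Python's last element), so todo.pop() is a head match
-- and the initial graph[c][::-1] is the child list itself — exact.
def nextChild (v : List Bool) (n : Int) : List Int → Option (Int × List Int)
  | [] => none
  | c :: todo => if getBool v (slotOf n c) then nextChild v n todo else some (c, todo)

-- sum(processed[c] for c in graph[node])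
def sumProcessed (p : List Bool) (n : Int) (children : List Int) : Nat :=
  children.foldl (fun s c => s + (if getBool p (slotOf n c) then 1 else 0)) 0

-- B's while loop over the frame stack (fuel is only a totality guard)
def whileB (g : List (List Int)) (n : Int) :
    Nat → List (Int × List Int) → List Bool → List Bool → List Int →
    Option (List Bool × List Bool × List Int)
  | _, [], v, p, res => some (v, p, res)
  | 0, _ :: _, v, p, res => some (v, p, res)
  | fuel + 1, (node, todo) :: rest, v, p, res =>
      match nextChild v n todo with
      | some (c, todo') =>
          whileB g n fuel ((c, g.getD (slotOf n c) []) :: (node, todo') :: rest)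
            (v.set (slotOf n c) true) p res
      | none =>
          let p' := p.set (slotOf n node) true
          let children := g.getD (slotOf n node) []
          if children.length ≠ 0 ∧ sumProcessed p' n children ≤ 1 then none
          else whileB g n fuel rest v p' (res ++ [node])

def forB (g : List (List Int)) (n : Int) :
    List Int → List Bool → List Bool → List Int → Option (List Int)
  | [], _, _, res => some res
  | i :: is, v, p, res =>
      if getBool v (slotOf n i) then forB g n is v p res
      else
        match whileB g n (2 * n.toNat + 1) [(i, g.getD (slotOf n i) [])]
            (v.set (slotOf n i) true) p res with
        | none => none
        | some (v', p', res') => forB g n is v' p' res'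

def release_them_all_alt (hunting_list : List (Int × Int)) (n : Int) : Option (List Int) :=
  forB (buildGraph hunting_list n) n ((List.range n.toNat).map Int.ofNat)
    (List.replicate n.toNat false) (List.replicate n.toNat false) []

-- ===== PRECONDITION & SPEC =====
-- Exactly A's non-raising domain: every edge endpoint must be a valid Python
-- index into the n lists (−n ≤ x < n, wraparound included); outside this A
-- raises IndexError (for a nonempty list this also forces n ≥ 1).  On a few such
-- inputs A still returns (it aborts with None before the DFS ever reads the
-- out-of-range label); B returns None there too — the exclusion is only so the
-- ports need not model the abort-before-IndexError race.
def Pre_release_them_all (hunting_list : List (Int × Int)) (n : Int) : Prop :=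
  ∀ ab ∈ hunting_list, -n ≤ ab.1 ∧ ab.1 < n ∧ -n ≤ ab.2 ∧ ab.2 < n

instance (hunting_list : List (Int × Int)) (n : Int) : Decidable (Pre_release_them_all hunting_list n) := by
  unfold Pre_release_them_all; infer_instance

def pvWitness_release_them_all : (List (Int × Int)) × Int := ([(0, 1), (0, 2)], 3)

def Spec_release_them_all (hunting_list : List (Int × Int)) (n : Int) (out : Option (List Int)) : Prop := out = release_them_all_alt hunting_list n
instance (hunting_list : List (Int × Int)) (n : Int) (out : Option (List Int)) : Decidable (Spec_release_them_all hunting_list n out) := by unfold Spec_release_them_all; infer_instance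

-- ===== CLAIM (what is proved, stated in full; the proofs are below) =====
def Claim_equal_release_them_all : Prop := ∀ (hunting_list : List (Int × Int)) (n : Int), Dom_release_them_all hunting_list n → Pre_release_them_all hunting_list n → Spec_release_them_all hunting_list n (release_them_all hunting_list n)

-- ===== LEMMAS AND PROOFS =====

theorem slot_lt {n x : Int} (h1 : -n ≤ x) (h2 : x < n) : slotOf n x < n.toNat := by
  unfold slotOf; split <;> omega

theorem getBool_set_self {v : List Bool} {k : Nat} {b : Bool} (h : k < v.length) :
    getBool (v.set k b) k = b := by
  simp [getBool, List.getD, List.getElem?_set_self, h]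

theorem getBool_set_ne {v : List Bool} {j k : Nat} {b : Bool} (h : j ≠ k) :
    getBool (v.set j b) k = getBool v k := by
  simp [getBool, List.getD, List.getElem?_set_ne h]

theorem getD_set_self {l : List Nat} {k : Nat} {a : Nat} (h : k < l.length) :
    (l.set k a).getD k 0 = a := by
  simp [List.getD, List.getElem?_set_self, h]

theorem getD_set_ne {l : List Nat} {j k : Nat} {a : Nat} (h : j ≠ k) :
    (l.set j a).getD k 0 = l.getD k 0 := by
  simp [List.getD, List.getElem?_set_ne h]

theorem getBool_set_true_mono {v : List Bool} {j k : Nat} (h : getBool v k = true) :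
    getBool (v.set j true) k = true := by
  by_cases hjk : j = k
  · subst hjk
    by_cases hl : j < v.length
    · exact getBool_set_self hl
    · rwa [List.set_eq_of_length_le (by omega)]
  · rwa [getBool_set_ne hjk]

-- skipVisited stops at an unvisited child
theorem skip_spec (children : List Int) (v : List Bool) (n : Int) (k : Nat)
    (h : skipVisited children v n k < children.length) :
    getBool v (slotOf n (children.getD (skipVisited children v n k) 0)) = false := by
  by_cases hk : k < children.length
  · have hgd : children.getD k 0 = children[k] := by
      simp [List.getD, List.getElem?_eq_getElem hk]
    by_cases hv : getBool v (slotOf n children[k]) = true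
    · have he : skipVisited children v n k = skipVisited children v n (k + 1) := by
        rw [skipVisited]; simp [hk, hgd, hv]
      rw [he] at h ⊢
      exact skip_spec children v n (k + 1) h
    · have he : skipVisited children v n k = k := by
        rw [skipVisited]; simp [hk, hgd, hv]
      rw [he] at h ⊢
      rw [hgd]; simpa using hv
  · have he : skipVisited children v n k = k := by rw [skipVisited]; simp [hk]
    rw [he] at h; omega
termination_by children.length - k

-- B's scan of the remaining children equals A's index skip
theorem nextChild_drop (v : List Bool) (n : Int) (children : List Int) (k : Nat) :
    nextChild v n (children.drop k) =
      (if skipVisited children v n k < children.length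
       then some (children.getD (skipVisited children v n k) 0,
                  children.drop (skipVisited children v n k + 1))
       else none) := by
  by_cases h : k < children.length
  · rw [List.drop_eq_getElem_cons h]
    rw [nextChild]
    unfold skipVisited
    simp only [h, dif_pos]
    have hgd : children.getD k 0 = children[k] := by
      simp [List.getD, List.getElem?_eq_getElem h]
    by_cases hv : getBool v (slotOf n children[k]) = true
    · simp only [hgd, hv, if_pos]
      exact nextChild_drop v n children (k + 1)
    · simp only [hgd, hv]
      simp [h, hgd]
  · have h1 : children.drop k = [] := List.drop_eq_nil_of_le (by omega)
    have h2 : skipVisited children v n k = k := by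
      unfold skipVisited; simp [h]
    rw [h1, h2, nextChild]
    simp [h]
termination_by children.length - k

theorem foldl_sum_le (p : List Bool) (n : Int) :
    ∀ (children : List Int) (acc : Nat),
      acc ≤ children.foldl (fun s c => s + (if getBool p (slotOf n c) then 1 else 0)) acc
  | [], acc => le_refl acc
  | c :: rest, acc => by
      simp only [List.foldl_cons]
      exact le_trans (Nat.le_add_right _ _) (foldl_sum_le p n rest _)

theorem count_gt_iff (p : List Bool) (n : Int) :
    ∀ (children : List Int) (count : Nat),
      (countLoopA p n children count > 1) ↔
        (children.foldl (fun s c => s + (if getBool p (slotOf n c) then 1 else 0)) count > 1)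
  | [], count => Iff.rfl
  | c :: rest, count => by
      rw [countLoopA]
      simp only [List.foldl_cons]
      have hstep : (if getBool p (slotOf n c) then count + 1 else count)
          = count + (if getBool p (slotOf n c) then 1 else 0) := by
        split <;> simp
      by_cases hgt : (if getBool p (slotOf n c) then count + 1 else count) > 1
      · rw [if_pos hgt]
        constructor
        · intro _
          calc 1 < (if getBool p (slotOf n c) then count + 1 else count) := hgt
            _ = count + (if getBool p (slotOf n c) then 1 else 0) := hstep
            _ ≤ _ := foldl_sum_le p n rest _
        · intro _; exact hgt
      · rw [if_neg hgt, ← hstep]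
        exact count_gt_iff p n rest _

-- the main simulation: A's (node stack, index array) runs in lockstep with
-- B's frame stack, frame j holding the not-yet-scanned suffix of node j's children
theorem simWhile (g : List (List Int)) (n : Int) (N : Nat)
    (hg : ∀ l ∈ g, ∀ c ∈ l, slotOf n c < N) :
    ∀ (fuel : Nat) (stA : List Int) (v p : List Bool) (ix : List Nat) (res : List Int),
      v.length = N → ix.length = N →
      (∀ k, getBool v k = false → ix.getD k 0 = 0) →
      (∀ x ∈ stA, getBool v (slotOf n x) = true) →
      (∀ x ∈ stA, slotOf n x < N) →
      (stA.map (slotOf n)).Nodup →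
      (match whileB g n fuel
          (stA.map (fun x => (x, (g.getD (slotOf n x) []).drop (ix.getD (slotOf n x) 0))))
          v p res with
       | none => whileA g n fuel stA v p ix res = none
       | some (v', p', res') =>
           v'.length = N ∧ ∃ ix', ix'.length = N ∧
             (∀ k, getBool v' k = false → ix'.getD k 0 = 0) ∧
             whileA g n fuel stA v p ix res = some (v', p', ix', res')) := by
  intro fuel
  induction fuel with
  | zero =>
    intro stA v p ix res hv hix hix0 hstv hstN hnd
    cases stA with
    | nil => simp only [List.map_nil, whileB, whileA]; exact ⟨hv, ix, hix, hix0, rfl⟩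
    | cons temp rest =>
      simp only [List.map_cons, whileB, whileA]; exact ⟨hv, ix, hix, hix0, rfl⟩
  | succ fuel IH =>
    intro stA v p ix res hv hix hix0 hstv hstN hnd
    cases stA with
    | nil => simp only [List.map_nil, whileB, whileA]; exact ⟨hv, ix, hix, hix0, rfl⟩
    | cons temp rest =>
      have htv : getBool v (slotOf n temp) = true := hstv temp (List.mem_cons_self ..)
      have htN : slotOf n temp < N := hstN temp (List.mem_cons_self ..)
      simp only [List.map_cons] at hnd ⊢
      obtain ⟨hSnot, hndrest⟩ := List.nodup_cons.mp hnd
      set S := slotOf n temp with hS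
      set children := g.getD S [] with hch
      set k := ix.getD S 0 with hk
      set i := skipVisited children v n k with hi
      by_cases hilt : i < children.length
      · set c := children.getD i 0 with hc
        have hNC : nextChild v n (children.drop k) = some (c, children.drop (i + 1)) := by
          rw [nextChild_drop v n children k, ← hi, ← hc, if_pos hilt]
        have hcmem : c ∈ children := by
          have hgd : children.getD i 0 = children[i] := by
            simp [List.getD, List.getElem?_eq_getElem hilt]
          rw [hc, hgd]; exact List.getElem_mem hilt
        have hcN : slotOf n c < N := by
          by_cases hsg : S < g.length
          · have hge : children = g[S] := by
              rw [hch]; simp [List.getD, List.getElem?_eq_getElem hsg]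
            exact hg g[S] (List.getElem_mem hsg) c (hge ▸ hcmem)
          · have hge : children = [] := by
              have hle : g.length ≤ S := by omega
              rw [hch]; simp [List.getD, List.getElem?_eq_none hle]
            rw [hge] at hcmem; simp at hcmem
        have hcun : getBool v (slotOf n c) = false := by
          have := skip_spec children v n k hilt
          rw [← hi, ← hc] at this; exact this
        have hstne : ∀ x ∈ temp :: rest, slotOf n x ≠ slotOf n c := by
          intro x hx heq
          have hxv := hstv x hx
          rw [heq, hcun] at hxv; simp at hxv
        set ix1 := ix.set S (i + 1) with hix1
        have h1 : ix1.getD (slotOf n c) 0 = 0 := by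
          rw [hix1, getD_set_ne (hS ▸ hstne temp (List.mem_cons_self ..))]
          exact hix0 _ hcun
        have h2 : ix1.getD S 0 = i + 1 := getD_set_self (hix ▸ htN)
        have hrest : rest.map (fun x => (x, (g.getD (slotOf n x) []).drop (ix.getD (slotOf n x) 0)))
            = rest.map (fun x => (x, (g.getD (slotOf n x) []).drop (ix1.getD (slotOf n x) 0))) := by
          apply List.map_congr_left
          intro x hx
          have hne : S ≠ slotOf n x := by
            intro heq
            exact hSnot (heq ▸ List.mem_map_of_mem hx)
          rw [hix1, getD_set_ne hne]
        have hframes :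
            (c, g.getD (slotOf n c) []) :: (temp, children.drop (i + 1)) ::
              rest.map (fun x => (x, (g.getD (slotOf n x) []).drop (ix.getD (slotOf n x) 0)))
            = (c :: temp :: rest).map
                (fun x => (x, (g.getD (slotOf n x) []).drop (ix1.getD (slotOf n x) 0))) := by
          simp only [List.map_cons]
          rw [h1, List.drop_zero, ← hS, h2, ← hch, hrest]
        rw [whileB]
        simp only [← hS, ← hch, ← hk]
        rw [hNC]
        dsimp only
        rw [hframes]
        have hA : whileA g n (fuel + 1) (temp :: rest) v p ix res
            = whileA g n fuel (c :: temp :: rest) (v.set (slotOf n c) true) p ix1 res := by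
          rw [whileA]
          simp only [← hS, ← hch, ← hk, ← hi, ← hc, ← hix1]
          rw [if_pos hilt]
        rw [hA]
        apply IH (c :: temp :: rest) (v.set (slotOf n c) true) p ix1 res
        · simp [hv]
        · simp [hix1, hix]
        · intro k' hk'
          have hkc : k' ≠ slotOf n c := by
            intro heq
            rw [heq, getBool_set_self (by omega)] at hk'
            simp at hk'
          rw [getBool_set_ne (fun h => hkc h.symm)] at hk'
          have hkS : S ≠ k' := by
            intro heq
            rw [← heq, hS, htv] at hk'; simp at hk'
          rw [hix1, getD_set_ne hkS]
          exact hix0 _ hk'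
        · intro x hx
          rcases List.mem_cons.mp hx with rfl | hx2
          · exact getBool_set_self (by omega)
          · exact getBool_set_true_mono (hstv x hx2)
        · intro x hx
          rcases List.mem_cons.mp hx with rfl | hx2
          · exact hcN
          · exact hstN x hx2
        · simp only [List.map_cons, List.nodup_cons]
          refine ⟨?_, hSnot, hndrest⟩
          simp only [List.mem_cons, List.mem_map]
          rintro (heq | ⟨x, hx, heq⟩)
          · exact hstne temp (List.mem_cons_self ..) heq.symm
          · exact hstne x (List.mem_cons_of_mem _ hx) heq
      · have hNC : nextChild v n (children.drop k) = none := by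
          rw [nextChild_drop v n children k, ← hi, if_neg hilt]
        set p1 := p.set S true with hp1
        have hcnt := count_gt_iff p1 n children 0
        have hsum : sumProcessed p1 n children
            = children.foldl (fun s c => s + (if getBool p1 (slotOf n c) then 1 else 0)) 0 := rfl
        rw [whileB]
        simp only [← hS, ← hch, ← hk]
        rw [hNC]
        dsimp only
        simp only [← hS, ← hch, ← hp1]
        by_cases hok : children.length ≠ 0 ∧ sumProcessed p1 n children ≤ 1
        · rw [if_pos hok]
          have hnotA : ¬ (countLoopA p1 n children 0 > 1 ∨ children.length = 0) := by
            rw [hcnt, ← hsum] at *; omega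
          rw [whileA]
          simp only [← hS, ← hch, ← hk, ← hi, ← hp1]
          rw [if_neg hilt, if_neg hnotA]
        · rw [if_neg hok]
          have hyesA : countLoopA p1 n children 0 > 1 ∨ children.length = 0 := by
            rw [hcnt, ← hsum] at *; omega
          set ix1 := ix.set S i with hix1
          have hA : whileA g n (fuel + 1) (temp :: rest) v p ix res
              = whileA g n fuel rest v p1 ix1 (res ++ [temp]) := by
            rw [whileA]
            simp only [← hS, ← hch, ← hk, ← hi, ← hp1, ← hix1]
            rw [if_neg hilt, if_pos hyesA]
          rw [hA]
          have hrest : rest.map (fun x => (x, (g.getD (slotOf n x) []).drop (ix.getD (slotOf n x) 0)))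
              = rest.map (fun x => (x, (g.getD (slotOf n x) []).drop (ix1.getD (slotOf n x) 0))) := by
            apply List.map_congr_left
            intro x hx
            have hne : S ≠ slotOf n x := by
              intro heq
              exact hSnot (heq ▸ List.mem_map_of_mem hx)
            rw [hix1, getD_set_ne hne]
          rw [hrest]
          apply IH rest v p1 ix1 (res ++ [temp]) hv (by simp [hix1, hix])
          · intro k' hk'
            have hkS : S ≠ k' := by
              intro heq
              rw [← heq, hS, htv] at hk'; simp at hk'
            rw [hix1, getD_set_ne hkS]
            exact hix0 _ hk'
          · exact fun x hx => hstv x (List.mem_cons_of_mem _ hx)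
          · exact fun x hx => hstN x (List.mem_cons_of_mem _ hx)
          · exact hndrest

theorem simFor (g : List (List Int)) (n : Int) (N : Nat)
    (hg : ∀ l ∈ g, ∀ c ∈ l, slotOf n c < N) :
    ∀ (is : List Int) (v p : List Bool) (ix : List Nat) (res : List Int),
      v.length = N → ix.length = N →
      (∀ k, getBool v k = false → ix.getD k 0 = 0) →
      (∀ i ∈ is, slotOf n i < N) →
      forA g n is v p ix res = forB g n is v p res := by
  intro is
  induction is with
  | nil => intro v p ix res _ _ _ _; rfl
  | cons i is IH =>
    intro v p ix res hv hix hix0 hroots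
    rw [forA, forB]
    by_cases hvis : getBool v (slotOf n i) = true
    · rw [if_pos hvis, if_pos hvis]
      exact IH v p ix res hv hix hix0 (fun j hj => hroots j (List.mem_cons_of_mem _ hj))
    · rw [if_neg hvis, if_neg hvis]
      have hlt : slotOf n i < N := hroots i (List.mem_cons_self ..)
      have h0 : ix.getD (slotOf n i) 0 = 0 := hix0 _ (by simpa using hvis)
      have hsim := simWhile g n N hg (2 * n.toNat + 1) [i] (v.set (slotOf n i) true) p ix res
        (by simp [hv]) hix
        (by
          intro k hk
          apply hix0
          by_cases hki : slotOf n i = k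
          · rw [← hki, getBool_set_self (by omega)] at hk; exact absurd hk (by simp)
          · rwa [getBool_set_ne hki] at hk)
        (by
          intro x hx
          rw [List.mem_singleton] at hx; subst hx
          exact getBool_set_self (by omega))
        (by intro x hx; rw [List.mem_singleton] at hx; subst hx; exact hlt)
        (by simp)
      rw [List.map_singleton, h0, List.drop_zero] at hsim
      rcases hB : whileB g n (2 * n.toNat + 1) [(i, g.getD (slotOf n i) [])]
          (v.set (slotOf n i) true) p res with _ | ⟨v', p', res'⟩
      · rw [hB] at hsim
        rw [hsim]
      · rw [hB] at hsim
        obtain ⟨hv', ix', hix', hix0', hA⟩ := hsim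
        rw [hA]
        exact IH v' p' ix' res' hv' hix' hix0'
          (fun j hj => hroots j (List.mem_cons_of_mem _ hj))

theorem foldl_graph_bound (n : Int) :
    ∀ (hl : List (Int × Int)) (g : List (List Int)),
      (∀ l ∈ g, ∀ c ∈ l, slotOf n c < n.toNat) →
      (∀ ab ∈ hl, slotOf n ab.2 < n.toNat) →
      ∀ l ∈ hl.foldl (fun g ab => g.set (slotOf n ab.1) (g.getD (slotOf n ab.1) [] ++ [ab.2])) g,
        ∀ c ∈ l, slotOf n c < n.toNat
  | [], g, hgood, _ => hgood
  | ab :: tl, g, hgood, hhl => by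
      simp only [List.foldl_cons]
      apply foldl_graph_bound n tl
      · intro l hl' c hc
        rcases List.mem_or_eq_of_mem_set hl' with hmem | rfl
        · exact hgood l hmem c hc
        · rcases List.mem_append.mp hc with hc1 | hc2
          · by_cases hs : slotOf n ab.1 < g.length
            · have : g.getD (slotOf n ab.1) [] = g[slotOf n ab.1] := by
                simp [List.getD, List.getElem?_eq_getElem hs]
              rw [this] at hc1
              exact hgood _ (List.getElem_mem hs) c hc1
            · have : g.getD (slotOf n ab.1) [] = [] := by
                have hle : g.length ≤ slotOf n ab.1 := by omega
                simp [List.getD, List.getElem?_eq_none hle]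
              rw [this] at hc1
              simp at hc1
          · have : c = ab.2 := by simpa using hc2
            exact this ▸ hhl ab (List.mem_cons_self ..)
      · intro ab' hab'
        exact hhl ab' (List.mem_cons_of_mem _ hab')

theorem graph_child_bound (hl : List (Int × Int)) (n : Int)
    (hpre : Pre_release_them_all hl n) :
    ∀ l ∈ buildGraph hl n, ∀ c ∈ l, slotOf n c < n.toNat := by
  apply foldl_graph_bound n hl
  · intro l hlmem c hc
    rw [List.eq_of_mem_replicate hlmem] at hc
    simp at hc
  · intro ab hab
    obtain ⟨_, _, h3, h4⟩ := hpre ab hab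
    exact slot_lt h3 h4

-- ===== VERDICT (by name: the statement is the Claim_ definition above) =====
theorem release_them_all_spec : Claim_equal_release_them_all := by
  intro hl n _ hpre
  unfold Spec_release_them_all release_them_all release_them_all_alt
  apply simFor (buildGraph hl n) n n.toNat (graph_child_bound hl n hpre)
  · simp
  · simp
  · intro k _
    by_cases h : k < n.toNat
    · simp [List.getD, List.getElem?_replicate, h]
    · have hle : (List.replicate n.toNat (0 : Nat)).length ≤ k := by simp; omega
      simp [List.getD, List.getElem?_eq_none hle]
  · intro i hi
    simp only [List.mem_map, List.mem_range] at hi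
    obtain ⟨j, hj, rfl⟩ := hi
    simp [slotOf, Int.ofNat]
    omega
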